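-- pv_equiv track=rewrite | github.com/pydeep9026/fixshell | fixshell/command_formatter.py | group_flags
-- ===== SOURCE A (Python) =====
-- def detect_short_flags(tokens):
--     flag_groups = []
--     current_group = []
--     start_idx = None
--
--     i = 0
--     while i < len(tokens):
--         token = tokens[i]
--         if token.startswith('-') and not token.startswith('--') and len(token) == 2:
--             if start_idx is None:
--                 start_idx = i
--             current_group.append(token)
--         else:
--             if len(current_group) > 1:
--                 flag_groups.append((start_idx, current_group))
--             current_group = []
--             start_idx = None
--         i += 1
--
--     if len(current_group) > 1:
--         flag_groups.append((start_idx, current_group))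
--
--     return flag_groups
--
-- def group_flags(command):
--     tokens = command.split()
--     if len(tokens) < 3:
--         return command
--
--     flag_groups = detect_short_flags(tokens)
--
--     if not flag_groups:
--         return command
--
--     processed = set()
--     result_tokens = []
--
--     for start_idx, flags in flag_groups:
--         for idx in range(start_idx, start_idx + len(flags)):
--             processed.add(idx)
--         combined = '-' + ''.join([f[1] for f in flags])
--         result_tokens.append((start_idx, combined))
--
--     for i, token in enumerate(tokens):
--         if i not in processed:
--             result_tokens.append((i, token))
--
--     result_tokens.sort(key=lambda x: x[0])
--     return ' '.join([token for _, token in result_tokens])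
-- ===== SOURCE B (Python) =====
-- def _flush(out, run, grouped):
--     if len(run) > 1:
--         out.append('-' + ''.join(f[1] for f in run))
--         return True
--     out.extend(run)
--     return grouped
--
--
-- def group_flags(command):
--     tokens = command.split()
--     if len(tokens) < 3:
--         return command
--     out = []
--     run = []
--     grouped = False
--     for t in tokens:
--         if t.startswith('-') and not t.startswith('--') and len(t) == 2:
--             run.append(t)
--         else:
--             grouped = _flush(out, run, grouped)
--             out.append(t)
--             run = []
--     grouped = _flush(out, run, grouped)
--     return ' '.join(out) if grouped else command
-- ===== Notes on version B (the rewrite author's own statement) =====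
-- stated objective: simpler
-- what changed: Replaces A's detect-groups pass plus processed-index set, second enumerate pass and final sort-by-index with one left-to-right pass that accumulates a run of short flags and flushes it in place, so all index bookkeeping disappears.
import Mathlib
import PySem

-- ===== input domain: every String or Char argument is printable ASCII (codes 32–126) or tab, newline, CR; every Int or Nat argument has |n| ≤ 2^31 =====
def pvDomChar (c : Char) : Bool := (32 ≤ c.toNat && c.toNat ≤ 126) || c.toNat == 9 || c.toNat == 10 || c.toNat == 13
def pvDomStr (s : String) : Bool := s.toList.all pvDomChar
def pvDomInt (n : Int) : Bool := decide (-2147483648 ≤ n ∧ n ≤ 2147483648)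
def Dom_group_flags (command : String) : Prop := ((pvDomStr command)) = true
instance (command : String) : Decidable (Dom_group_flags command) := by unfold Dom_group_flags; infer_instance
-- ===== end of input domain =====

-- B replaces A's group-detection pass + processed-index set + enumerate pass + sort-by-index
-- with a single left-to-right pass that flushes each run of short flags in place (objective: simpler).

-- Shared vocabulary of both sources: the short-flag test and the combined token
-- (both Python programs contain these expressions verbatim).
def isShortFlag (t : String) : Bool :=
  PySem.Str.startswith t "-" && !(PySem.Str.startswith t "--") && (PySem.Str.len t == 2)

-- f[1]: at every call site (in both programs) each f has length 2, so pyGet? is always some;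
-- getD ' ' is the unreachable default.
def combineFlags (fs : List String) : String :=
  "-" ++ PySem.Str.join "" (fs.map (fun f => String.ofList [(PySem.Str.pyGet? f 1).getD ' ']))

-- ===== PORT A =====
def detectGo : List String → Int → List String → Option Int → List (Int × List String) → List (Int × List String)
  | [], _, cur, start, acc => if cur.length > 1 then acc ++ [(start.getD 0, cur)] else acc
  | t :: rest, i, cur, start, acc =>
    if isShortFlag t then detectGo rest (i + 1) (cur ++ [t]) (some (start.getD i)) acc
    else detectGo rest (i + 1) [] none (if cur.length > 1 then acc ++ [(start.getD 0, cur)] else acc)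

def detect_short_flags (tokens : List String) : List (Int × List String) :=
  detectGo tokens 0 [] none []

def group_flags (command : String) : String :=
  let tokens := PySem.Str.split₀ command
  if tokens.length < 3 then command
  else
    let fg := detect_short_flags tokens
    if fg = [] then command
    else
      -- one loop updating (processed, result_tokens)
      let pr := fg.foldl (fun (pr : PySem.Set Int × List (Int × String)) p =>
        ((PySem.List.pyRange p.1 (p.1 + (p.2.length : Int)) 1).foldl (fun s idx => PySem.Set.add s idx) pr.1,
         pr.2 ++ [(p.1, combineFlags p.2)])) (PySem.Set.empty, [])
      let rt := (PySem.List.enumerate tokens 0).foldl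
        (fun rt p => if PySem.Set.contains pr.1 p.1 then rt else rt ++ [p]) pr.2
      PySem.Str.join " " ((PySem.List.sorted rt (fun x => x.1) false).map (fun p => p.2))

-- ===== PORT B =====
def flushRun (out run : List String) (grouped : Bool) : List String × Bool :=
  if run.length > 1 then (out ++ [combineFlags run], true) else (out ++ run, grouped)

def goAlt : List String → List String → List String → Bool → List String × Bool
  | [], out, run, grouped => flushRun out run grouped
  | t :: rest, out, run, grouped =>
    if isShortFlag t then goAlt rest out (run ++ [t]) grouped
    else
      let og := flushRun out run grouped
      goAlt rest (og.1 ++ [t]) [] og.2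

def group_flags_alt (command : String) : String :=
  let tokens := PySem.Str.split₀ command
  if tokens.length < 3 then command
  else
    let og := goAlt tokens [] [] false
    if og.2 then PySem.Str.join " " og.1 else command

-- ===== PRECONDITION & SPEC =====
def Spec_group_flags (command : String) (out : String) : Prop := out = group_flags_alt command
instance (command : String) (out : String) : Decidable (Spec_group_flags command out) := by unfold Spec_group_flags; infer_instance

-- ===== CLAIM (what is proved, stated in full; the proofs are below) =====
def Claim_equal_group_flags : Prop := ∀ (command : String), Dom_group_flags command → Spec_group_flags command (group_flags command)

-- ===== LEMMAS AND PROOFS =====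

-- Spec-level recursion: groups of consecutive short flags, the merged token stream with
-- indices, and the "at least one group" flag.  i = current index, s = start of current run,
-- invariant s + cur.length = i.
def Dn : List String → Int → Int → List String → List (Int × List String)
  | [], _, s, cur => if cur.length > 1 then [(s, cur)] else []
  | t :: ts, i, s, cur =>
    if isShortFlag t then Dn ts (i + 1) s (cur ++ [t])
    else (if cur.length > 1 then [(s, cur)] else []) ++ Dn ts (i + 1) (i + 1) []

def coveredB (gs : List (Int × List String)) (j : Int) : Bool :=
  gs.any (fun p => decide (p.1 ≤ j ∧ j < p.1 + p.2.length))

def flushI (s : Int) (cur : List String) : List (Int × String) :=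
  if cur.length > 1 then [(s, combineFlags cur)] else PySem.List.enumerate cur s

def LI : List String → Int → Int → List String → List (Int × String)
  | [], _, s, cur => flushI s cur
  | t :: ts, i, s, cur =>
    if isShortFlag t then LI ts (i + 1) s (cur ++ [t])
    else flushI s cur ++ (i, t) :: LI ts (i + 1) (i + 1) []

def hasG : List String → List String → Bool
  | [], cur => decide (cur.length > 1)
  | t :: ts, cur => if isShortFlag t then hasG ts (cur ++ [t]) else (decide (cur.length > 1)) || hasG ts []

theorem detectGo_eq (ts : List String) : ∀ (i s : Int) (cur : List String) (start : Option Int)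
    (acc : List (Int × List String)),
    ((start = none ∧ cur = [] ∧ s = i) ∨ (start = some s ∧ s + cur.length = i)) →
    detectGo ts i cur start acc = acc ++ Dn ts i s cur := by
  induction ts with
  | nil =>
    intro i s cur start acc hinv
    rcases hinv with ⟨h1, h2, h3⟩ | ⟨h1, h2⟩
    · subst h1; subst h2; simp [detectGo, Dn]
    · subst h1
      by_cases hc : cur.length > 1 <;> simp [detectGo, Dn, hc]
  | cons t ts ih =>
    intro i s cur start acc hinv
    by_cases h : isShortFlag t
    · rcases hinv with ⟨h1, h2, h3⟩ | ⟨h1, h2⟩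
      · subst h1; subst h2
        simp only [detectGo, Dn, h, if_true, Option.getD_none]
        rw [h3]
        exact ih (i + 1) i [t] (some i) acc (Or.inr ⟨rfl, by simp⟩)
      · subst h1
        simp only [detectGo, Dn, h, if_true, Option.getD_some]
        exact ih (i + 1) s (cur ++ [t]) (some s) acc
          (Or.inr ⟨rfl, by simp at h2 ⊢; omega⟩)
    · rcases hinv with ⟨h1, h2, h3⟩ | ⟨h1, h2⟩
      · subst h1; subst h2
        simp only [detectGo, Dn, h, if_false, Bool.false_eq_true, List.length_nil]
        rw [h3, ih (i + 1) (i + 1) [] none _ (Or.inl ⟨rfl, rfl, rfl⟩)]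
        simp
      · subst h1
        simp only [detectGo, Dn, h, if_false, Bool.false_eq_true, Option.getD_some]
        rw [ih (i + 1) (i + 1) [] none _ (Or.inl ⟨rfl, rfl, rfl⟩)]
        by_cases hc : cur.length > 1 <;> simp [hc]

theorem range_add_contains (a b : Int) (st : PySem.Set Int) (j : Int) :
    PySem.Set.contains ((PySem.List.pyRange a b 1).foldl (fun s idx => PySem.Set.add s idx) st) j
      = (PySem.Set.contains st j || decide (a ≤ j ∧ j < b)) := by
  have e : (PySem.List.pyRange a b 1).foldl (fun s idx => PySem.Set.add s idx) st
      = PySem.Set.update st (PySem.List.pyRange a b 1) := rfl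
  rw [e, Bool.eq_iff_iff]
  simp only [PySem.Set.contains_iff, PySem.Set.mem_update, Bool.or_eq_true,
    decide_eq_true_eq, PySem.List.mem_pyRange_one]

theorem fold_fst_contains (fg : List (Int × List String)) :
    ∀ (st : PySem.Set Int) (rt : List (Int × String)) (j : Int),
    PySem.Set.contains (fg.foldl (fun (pr : PySem.Set Int × List (Int × String)) p =>
        ((PySem.List.pyRange p.1 (p.1 + (p.2.length : Int)) 1).foldl (fun s idx => PySem.Set.add s idx) pr.1,
         pr.2 ++ [(p.1, combineFlags p.2)])) (st, rt)).1 j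
      = (PySem.Set.contains st j || coveredB fg j) := by
  induction fg with
  | nil => intro st rt j; simp [coveredB]
  | cons p fg ih =>
    intro st rt j
    simp only [List.foldl_cons, coveredB, List.any_cons]
    rw [ih, range_add_contains]
    simp [coveredB, Bool.or_assoc]

theorem fold_snd_eq (fg : List (Int × List String)) :
    ∀ (st : PySem.Set Int) (rt : List (Int × String)),
    (fg.foldl (fun (pr : PySem.Set Int × List (Int × String)) p =>
        ((PySem.List.pyRange p.1 (p.1 + (p.2.length : Int)) 1).foldl (fun s idx => PySem.Set.add s idx) pr.1,
         pr.2 ++ [(p.1, combineFlags p.2)])) (st, rt)).2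
      = rt ++ fg.map (fun p => (p.1, combineFlags p.2)) := by
  induction fg with
  | nil => intro st rt; simp
  | cons p fg ih => intro st rt; simp only [List.foldl_cons, List.map_cons]; rw [ih]; simp

theorem fold_filter_eq (l : List (Int × String)) (P : Int → Bool) :
    ∀ (rt0 : List (Int × String)),
    l.foldl (fun rt p => if P p.1 then rt else rt ++ [p]) rt0
      = rt0 ++ l.filter (fun p => !P p.1) := by
  induction l with
  | nil => intro rt0; simp
  | cons p l ih =>
    intro rt0
    by_cases h : P p.1 <;> simp [List.foldl_cons, h, ih]

theorem Dn_fst_ge (ts : List String) : ∀ (i s : Int) (cur : List String),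
    s + cur.length = i → ∀ p ∈ Dn ts i s cur, s ≤ p.1 := by
  induction ts with
  | nil =>
    intro i s cur hinv p hp
    simp only [Dn] at hp
    split at hp <;> simp at hp
    simp [hp]
  | cons t ts ih =>
    intro i s cur hinv p hp
    by_cases h : isShortFlag t
    · simp only [Dn, h, if_true] at hp
      exact ih (i + 1) s (cur ++ [t]) (by simp at hinv ⊢; omega) p hp
    · simp only [Dn, h, if_false, Bool.false_eq_true, List.mem_append] at hp
      rcases hp with hp | hp
      · split at hp <;> simp at hp
        simp [hp]
      · have := ih (i + 1) (i + 1) [] (by simp) p hp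
        omega

theorem coveredB_false_of_lt (gs : List (Int × List String)) (c j : Int)
    (h : ∀ p ∈ gs, c ≤ p.1) (hj : j < c) : coveredB gs j = false := by
  simp only [coveredB, List.any_eq_false, decide_eq_true_eq]
  intro p hp
  have := h p hp
  omega

theorem coveredB_append (g1 g2 : List (Int × List String)) (j : Int) :
    coveredB (g1 ++ g2) j = (coveredB g1 j || coveredB g2 j) := by
  simp [coveredB]

theorem flush_decomp (s : Int) (cur : List String) :
    (if cur.length > 1 then [((s : Int), cur)] else []).map (fun p => (p.1, combineFlags p.2)) ++
      (PySem.List.enumerate cur s).filter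
        (fun p => !coveredB (if cur.length > 1 then [(s, cur)] else []) p.1)
      = flushI s cur := by
  by_cases hc : cur.length > 1
  · simp only [hc, if_true, List.map_cons, List.map_nil, flushI]
    have he : (PySem.List.enumerate cur s).filter (fun p => !coveredB [(s, cur)] p.1) = [] := by
      rw [List.filter_eq_nil_iff]
      intro p hp
      rw [PySem.List.mem_enumerate_iff] at hp
      obtain ⟨k, hk, rfl⟩ := hp
      simp [coveredB]
      omega
    rw [he, List.append_nil]
  · simp only [hc, if_false, List.map_nil, List.nil_append, flushI]
    have he : ∀ p ∈ PySem.List.enumerate cur s,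
        (!coveredB [] p.1) = (true : Bool) := by simp [coveredB]
    rw [List.filter_congr he, List.filter_true]

theorem perm_main (ts : List String) : ∀ (i s : Int) (cur : List String),
    s + cur.length = i →
    List.Perm
      ((Dn ts i s cur).map (fun p => (p.1, combineFlags p.2)) ++
        (PySem.List.enumerate (cur ++ ts) s).filter (fun p => !coveredB (Dn ts i s cur) p.1))
      (LI ts i s cur) := by
  induction ts with
  | nil =>
    intro i s cur hinv
    simp only [Dn, LI, List.append_nil]
    rw [flush_decomp]
  | cons t ts ih =>
    intro i s cur hinv
    by_cases h : isShortFlag t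
    · simp only [Dn, LI, h, if_true]
      have hre : cur ++ t :: ts = (cur ++ [t]) ++ ts := by simp
      rw [hre]
      exact ih (i + 1) s (cur ++ [t]) (by simp at hinv ⊢; omega)
    · simp only [Dn, LI, h, if_false, Bool.false_eq_true]
      have hDge : ∀ p ∈ Dn ts (i + 1) (i + 1) [], (i : Int) + 1 ≤ p.1 :=
        Dn_fst_ge ts (i + 1) (i + 1) [] (by simp)
      have hGcov : ∀ j : Int, i ≤ j →
          coveredB (if cur.length > 1 then [((s : Int), cur)] else []) j = false := by
        intro j hj
        split
        · simp only [coveredB, List.any_cons, List.any_nil, Bool.or_false,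
            decide_eq_false_iff_not]
          omega
        · simp [coveredB]
      have hsplit : PySem.List.enumerate (cur ++ t :: ts) s
          = PySem.List.enumerate cur s ++ (i, t) :: PySem.List.enumerate ts (i + 1) := by
        rw [PySem.List.enumerate_append, PySem.List.enumerate_cons, hinv]
      rw [hsplit, List.filter_append, List.filter_cons]
      have hcovi : (!coveredB ((if cur.length > 1 then [((s : Int), cur)] else []) ++
          Dn ts (i + 1) (i + 1) []) ((i : Int), t).1) = true := by
        rw [coveredB_append, hGcov i (le_refl i),
          coveredB_false_of_lt _ (i + 1) i hDge (by omega)]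
        rfl
      rw [if_pos hcovi]
      have fcur : (PySem.List.enumerate cur s).filter
            (fun p => !coveredB ((if cur.length > 1 then [((s : Int), cur)] else []) ++
              Dn ts (i + 1) (i + 1) []) p.1)
          = (PySem.List.enumerate cur s).filter
            (fun p => !coveredB (if cur.length > 1 then [((s : Int), cur)] else []) p.1) := by
        apply List.filter_congr
        intro p hp
        rw [PySem.List.mem_enumerate_iff] at hp
        obtain ⟨k, hk, rfl⟩ := hp
        rw [coveredB_append, coveredB_false_of_lt _ (i + 1) _ hDge (by simp; omega)]
        simp
      have fsuf : (PySem.List.enumerate ts (i + 1)).filter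
            (fun p => !coveredB ((if cur.length > 1 then [((s : Int), cur)] else []) ++
              Dn ts (i + 1) (i + 1) []) p.1)
          = (PySem.List.enumerate ts (i + 1)).filter
            (fun p => !coveredB (Dn ts (i + 1) (i + 1) []) p.1) := by
        apply List.filter_congr
        intro p hp
        rw [PySem.List.mem_enumerate_iff] at hp
        obtain ⟨k, hk, rfl⟩ := hp
        rw [coveredB_append, hGcov _ (by simp; omega)]
        simp
      rw [fcur, fsuf, List.map_append]
      have hAF := flush_decomp s cur
      have IH2 : ((Dn ts (i + 1) (i + 1) []).map (fun p => (p.1, combineFlags p.2)) ++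
            (PySem.List.enumerate ts (i + 1)).filter
              (fun p => !coveredB (Dn ts (i + 1) (i + 1) []) p.1)).Perm
          (LI ts (i + 1) (i + 1) []) := by
        have := ih (i + 1) (i + 1) [] (by simp)
        simpa using this
      -- abbreviate
      rw [← hAF]
      generalize (if cur.length > 1 then [((s : Int), cur)] else []).map
        (fun p => (p.1, combineFlags p.2)) = Gc at *
      generalize (Dn ts (i + 1) (i + 1) []).map (fun p => (p.1, combineFlags p.2)) = Dc at IH2 ⊢
      generalize (PySem.List.enumerate cur s).filter
        (fun p => !coveredB (if cur.length > 1 then [((s : Int), cur)] else []) p.1) = F at *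
      generalize (PySem.List.enumerate ts (i + 1)).filter
        (fun p => !coveredB (Dn ts (i + 1) (i + 1) []) p.1) = FS at IH2 ⊢
      generalize LI ts (i + 1) (i + 1) [] = LI' at IH2 ⊢
      have step1 : ((Gc ++ Dc) ++ (F ++ ((i : Int), t) :: FS)).Perm
          ((Gc ++ F) ++ ((i : Int), t) :: (Dc ++ FS)) := by
        have e1 : (Gc ++ Dc) ++ (F ++ ((i : Int), t) :: FS)
            = Gc ++ ((Dc ++ (F ++ [((i : Int), t)])) ++ FS) := by simp
        have e2 : (Gc ++ F) ++ ((i : Int), t) :: (Dc ++ FS)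
            = Gc ++ (((F ++ [((i : Int), t)]) ++ Dc) ++ FS) := by simp
        rw [e1, e2]
        exact List.Perm.append_left Gc
          (List.Perm.append_right FS List.perm_append_comm)
      exact step1.trans (List.Perm.append_left (Gc ++ F)
        (List.Perm.cons ((i : Int), t) IH2))

theorem mem_flushI (s : Int) (cur : List String) :
    ∀ p ∈ flushI s cur, s ≤ p.1 ∧ p.1 < s + cur.length := by
  intro p hp
  unfold flushI at hp
  split at hp
  · next h =>
    simp only [List.mem_singleton] at hp
    subst hp
    constructor
    · exact le_refl _
    · have : (1 : Int) < cur.length := by exact_mod_cast h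
      omega
  · rw [PySem.List.mem_enumerate_iff] at hp
    obtain ⟨k, hk, rfl⟩ := hp
    constructor
    · simp
    · simp; omega

theorem pairwise_flushI (s : Int) (cur : List String) :
    List.Pairwise (fun (a b : Int × String) => a.1 < b.1) (flushI s cur) := by
  unfold flushI
  split
  · exact List.pairwise_singleton _ _
  · exact PySem.List.pairwise_lt_enumerate cur s

theorem LI_pairwise (ts : List String) : ∀ (i s : Int) (cur : List String),
    s + cur.length = i →
    List.Pairwise (fun (a b : Int × String) => a.1 < b.1) (LI ts i s cur) ∧
      ∀ p ∈ LI ts i s cur, s ≤ p.1 := by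
  induction ts with
  | nil =>
    intro i s cur hinv
    exact ⟨pairwise_flushI s cur, fun p hp => (mem_flushI s cur p hp).1⟩
  | cons t ts ih =>
    intro i s cur hinv
    by_cases h : isShortFlag t
    · simp only [LI, h, if_true]
      exact ih (i + 1) s (cur ++ [t]) (by simp at hinv ⊢; omega)
    · simp only [LI, h, if_false, Bool.false_eq_true]
      obtain ⟨ihp, ihb⟩ := ih (i + 1) (i + 1) [] (by simp)
      have hcur : ∀ p ∈ flushI s cur, s ≤ p.1 ∧ p.1 < i := by
        intro p hp
        have := mem_flushI s cur p hp
        omega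
      constructor
      · rw [List.pairwise_append]
        refine ⟨pairwise_flushI s cur, ?_, ?_⟩
        · rw [List.pairwise_cons]
          refine ⟨fun q hq => ?_, ihp⟩
          have := ihb q hq
          omega
        · intro p hp q hq
          rcases List.mem_cons.mp hq with rfl | hq
          · exact (hcur p hp).2
          · have := ihb q hq
            have := (hcur p hp).2
            omega
      · intro p hp
        rcases List.mem_append.mp hp with hp | hp
        · exact (hcur p hp).1
        · rcases List.mem_cons.mp hp with rfl | hp
          · simp; omega
          · have := ihb p hp; omega

theorem goAlt_eq (ts : List String) : ∀ (out run : List String) (g : Bool) (i s : Int),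
    goAlt ts out run g = (out ++ (LI ts i s run).map (fun p => p.2), g || hasG ts run) := by
  induction ts with
  | nil =>
    intro out run g i s
    by_cases hc : run.length > 1 <;>
      simp [goAlt, LI, flushRun, flushI, hasG, hc, PySem.List.map_snd_enumerate]
  | cons t ts ih =>
    intro out run g i s
    by_cases h : isShortFlag t
    · simp only [goAlt, LI, hasG, h, if_true]
      exact ih out (run ++ [t]) g (i + 1) s
    · simp only [goAlt, LI, hasG, h, if_false, Bool.false_eq_true]
      rw [ih _ [] _ (i + 1) (i + 1)]
      by_cases hc : run.length > 1 <;>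
        simp [flushRun, flushI, hc, PySem.List.map_snd_enumerate, List.append_assoc]

theorem Dn_eq_nil_iff (ts : List String) : ∀ (i s : Int) (cur : List String),
    Dn ts i s cur = [] ↔ hasG ts cur = false := by
  induction ts with
  | nil =>
    intro i s cur
    by_cases hc : cur.length > 1 <;> simp [Dn, hasG, hc]
  | cons t ts ih =>
    intro i s cur
    by_cases h : isShortFlag t
    · simp only [Dn, hasG, h, if_true]
      exact ih (i + 1) s (cur ++ [t])
    · by_cases hc : cur.length > 1 <;>
        simp [Dn, hasG, h, hc, ih (i + 1) (i + 1) []]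

-- ===== VERDICT (by name: the statement is the Claim_ definition above) =====
theorem detect_eq (tokens : List String) :
    detect_short_flags tokens = Dn tokens 0 0 [] := by
  unfold detect_short_flags
  have := detectGo_eq tokens 0 0 [] none [] (Or.inl ⟨rfl, rfl, rfl⟩)
  simpa using this

theorem goAlt_top (tokens : List String) :
    goAlt tokens [] [] false = ((LI tokens 0 0 []).map (fun p => p.2), hasG tokens []) := by
  have := goAlt_eq tokens [] [] false 0 0
  simpa using this

theorem group_flags_spec : Claim_equal_group_flags := by
  intro command _
  unfold Spec_group_flags group_flags group_flags_alt
  by_cases hlen : (PySem.Str.split₀ command).length < 3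
  · simp only [hlen, if_true]
  · simp only [hlen, if_false]
    generalize PySem.Str.split₀ command = tokens
    rw [detect_eq, goAlt_top]
    by_cases hnil : Dn tokens 0 0 [] = []
    · have hg : hasG tokens [] = false := (Dn_eq_nil_iff tokens 0 0 []).mp hnil
      simp [hnil, hg]
    · have hg : hasG tokens [] = true := by
        rcases Bool.eq_false_or_eq_true (hasG tokens []) with h | h
        · exact h
        · exact absurd ((Dn_eq_nil_iff tokens 0 0 []).mpr h) hnil
      simp only [hnil, if_false, hg, if_true]
      rw [fold_snd_eq, fold_filter_eq]
      have hP : ∀ p : Int × String,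
          (!PySem.Set.contains ((Dn tokens 0 0 []).foldl
            (fun (pr : PySem.Set Int × List (Int × String)) p =>
              ((PySem.List.pyRange p.1 (p.1 + (p.2.length : Int)) 1).foldl
                (fun s idx => PySem.Set.add s idx) pr.1,
               pr.2 ++ [(p.1, combineFlags p.2)])) (PySem.Set.empty, [])).1 p.1)
            = !coveredB (Dn tokens 0 0 []) p.1 := by
        intro p
        rw [fold_fst_contains]
        have : PySem.Set.contains (PySem.Set.empty : PySem.Set Int) p.1 = false := rfl
        rw [this, Bool.false_or]
      rw [List.filter_congr (fun p _ => hP p)]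
      simp only [List.nil_append]
      have hperm : ((Dn tokens 0 0 []).map (fun p => (p.1, combineFlags p.2)) ++
            (PySem.List.enumerate tokens 0).filter
              (fun p => !coveredB (Dn tokens 0 0 []) p.1)).Perm (LI tokens 0 0 []) := by
        have := perm_main tokens 0 0 [] (by simp)
        simpa using this
      rw [PySem.List.sorted_eq_of_perm_of_pairwise_lt _ (LI tokens 0 0 [])
        (fun x => x.1) hperm.symm (LI_pairwise tokens 0 0 [] (by simp)).1]
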